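-- pv_equiv track=rewrite | github.com/SagnikMukherjee/PARC | src/error_eval/utils_ref.py | process_model_output_errors
-- ===== SOURCE A (Python) =====
-- from typing import List, Dict, Any
-- from typing import List, Dict
--
-- def process_model_output_errors(output: str) -> Dict[str, str]:
--     """Process model output to extract error classification and explanation."""
--     if output is None:
--         return {'verdict': 'Unknown', 'reasoning': '', 'explanation': ''}
--     output_lower = output.lower()
--     lines = output_lower.strip().split('\n')
--
--     result = {
--         'verdict': 'Unknown',
--         'reasoning': '',
--         'explanation': output
--     }
--
--     for i, line in enumerate(lines):
--         if line.startswith('reasoning:'):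
--             reasoning_lines = []
--             j = i + 1
--             while j < len(lines) and not lines[j].startswith('verdict:'):
--                 if lines[j].strip():
--                     reasoning_lines.append(lines[j].strip())
--                 j += 1
--             result['reasoning'] = ' '.join(reasoning_lines)
--         elif line.startswith('verdict:'):
--             result['verdict'] = line.replace('verdict:', '').strip().upper()
--
--     return result
-- ===== SOURCE B (Python) =====
-- def process_model_output_errors(output: str):
--     """Process model output to extract error classification and explanation."""
--     if output is None:
--         return {'verdict': 'Unknown', 'reasoning': '', 'explanation': ''}
--     lines = output.lower().strip().split('\n')
--     result = {'verdict': 'Unknown', 'reasoning': '', 'explanation': output}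
--     reasoning_lines = []
--     collecting = False
--     for line in lines:
--         if line.startswith('reasoning:'):
--             reasoning_lines = []
--             collecting = True
--         elif line.startswith('verdict:'):
--             result['verdict'] = line.replace('verdict:', '').strip().upper()
--             collecting = False
--         elif collecting and line.strip():
--             reasoning_lines.append(line.strip())
--     result['reasoning'] = ' '.join(reasoning_lines)
--     return result
-- ===== Notes on version B (the rewrite author's own statement) =====
-- stated objective: simpler
-- what changed: A re-scans forward from every reasoning-header line with a nested while-loop; B makes a single pass over the lines, keeping a collecting flag and an accumulator that is reset at each reasoning header and frozen at a verdict header.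
import Mathlib
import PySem

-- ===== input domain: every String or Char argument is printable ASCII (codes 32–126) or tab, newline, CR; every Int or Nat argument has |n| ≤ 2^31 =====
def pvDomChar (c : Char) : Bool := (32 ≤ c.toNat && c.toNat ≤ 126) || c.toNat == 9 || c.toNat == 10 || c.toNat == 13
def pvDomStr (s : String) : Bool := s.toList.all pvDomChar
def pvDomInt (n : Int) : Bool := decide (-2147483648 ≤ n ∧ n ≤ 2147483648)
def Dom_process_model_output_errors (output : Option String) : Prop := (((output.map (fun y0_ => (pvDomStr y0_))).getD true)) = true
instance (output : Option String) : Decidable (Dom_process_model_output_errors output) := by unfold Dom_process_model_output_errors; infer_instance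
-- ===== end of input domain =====

-- B replaces A's nested rescans (an inner while-loop from each 'reasoning:' line) by a single
-- pass with a collecting flag and an accumulator; same return value, objective: simpler.

-- ===== PORT A =====
-- output_lower.strip().split('\n')  (shared line-splitting code of both Pythons)
def pvLines (out : String) : List String :=
  match PySem.Str.split? (PySem.Str.strip (PySem.Str.lower out)) "\n" with
  | some ls => ls
  | none => []   -- unreachable: separator "\n" is nonempty

-- value assigned on a 'verdict:' line: line.replace('verdict:', '').strip().upper()
def pvVerdictOf (l : String) : String :=
  PySem.Str.upper (PySem.Str.strip (PySem.Str.replace l "verdict:" ""))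

-- A's inner while-loop: from j = i+1 collect stripped nonempty lines until a 'verdict:' line
def pvCollectA : List String → List String
  | [] => []
  | l :: ls =>
    if PySem.Str.startswith l "verdict:" then []
    else if PySem.Str.strip l ≠ "" then PySem.Str.strip l :: pvCollectA ls
    else pvCollectA ls

-- A's outer for-loop over the lines, mutating the result dict
def pvLoopA : List String → PySem.Dict String String → PySem.Dict String String
  | [], d => d
  | l :: ls, d =>
    if PySem.Str.startswith l "reasoning:" then
      pvLoopA ls (d.insert "reasoning" (PySem.Str.join " " (pvCollectA ls)))
    else if PySem.Str.startswith l "verdict:" then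
      pvLoopA ls (d.insert "verdict" (pvVerdictOf l))
    else pvLoopA ls d

def process_model_output_errors (output : Option String) : List (String × String) :=
  match output with
  | none => (PySem.Dict.ofList [("verdict", "Unknown"), ("reasoning", ""), ("explanation", "")]).items
  | some out =>
    let lines := pvLines out
    let result : PySem.Dict String String :=
      PySem.Dict.ofList [("verdict", "Unknown"), ("reasoning", ""), ("explanation", out)]
    (pvLoopA lines result).items

-- ===== PORT B =====
-- B's single pass: state (dict, reasoning_lines accumulator, collecting flag)
def pvLoopB : List String → PySem.Dict String String → List String → Bool →
    PySem.Dict String String × List String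
  | [], d, acc, _ => (d, acc)
  | l :: ls, d, acc, coll =>
    if PySem.Str.startswith l "reasoning:" then
      pvLoopB ls d [] true
    else if PySem.Str.startswith l "verdict:" then
      pvLoopB ls (d.insert "verdict" (pvVerdictOf l)) acc false
    else if coll && PySem.Str.strip l ≠ "" then
      pvLoopB ls d (acc ++ [PySem.Str.strip l]) coll
    else pvLoopB ls d acc coll

def process_model_output_errors_alt (output : Option String) : List (String × String) :=
  match output with
  | none => (PySem.Dict.ofList [("verdict", "Unknown"), ("reasoning", ""), ("explanation", "")]).items
  | some out =>
    let lines := pvLines out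
    let result : PySem.Dict String String :=
      PySem.Dict.ofList [("verdict", "Unknown"), ("reasoning", ""), ("explanation", out)]
    let (d, acc) := pvLoopB lines result [] false
    (d.insert "reasoning" (PySem.Str.join " " acc)).items

-- ===== PRECONDITION & SPEC =====
def Spec_process_model_output_errors (output : Option String) (out : List (String × String)) : Prop := out = process_model_output_errors_alt output
instance (output : Option String) (out : List (String × String)) : Decidable (Spec_process_model_output_errors output out) := by unfold Spec_process_model_output_errors; infer_instance

-- ===== CLAIM (what is proved, stated in full; the proofs are below) =====
def Claim_equal_process_model_output_errors : Prop := ∀ (output : Option String), Dom_process_model_output_errors output → Spec_process_model_output_errors output (process_model_output_errors output)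

-- ===== LEMMAS AND PROOFS =====

-- the concrete three-key dict both loops thread (keys fixed, values vary)
def pvD3 (v r e : String) : PySem.Dict String String :=
  PySem.Dict.mk [("verdict", v), ("reasoning", r), ("explanation", e)]

lemma pvD3_insV (v r e w : String) : (pvD3 v r e).insert "verdict" w = pvD3 w r e := by
  simp [pvD3, PySem.Dict.insert]

lemma pvD3_insR (v r e w : String) : (pvD3 v r e).insert "reasoning" w = pvD3 v w e := by
  simp [pvD3, PySem.Dict.insert]

-- main invariant: B's state (acc, coll) relates to A's already-written reasoning value
lemma pvLoop_eq (ls : List String) (r e : String) : ∀ (v : String) (acc : List String) (coll : Bool),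
    (pvLoopB ls (pvD3 v r e) acc coll).1.insert "reasoning"
      (PySem.Str.join " " (pvLoopB ls (pvD3 v r e) acc coll).2)
    = pvLoopA ls (pvD3 v (PySem.Str.join " " (acc ++ if coll then pvCollectA ls else [])) e) := by
  induction ls with
  | nil => intro v acc coll; cases coll <;> simp [pvLoopA, pvLoopB, pvCollectA, pvD3_insR]
  | cons l ls ih =>
    intro v acc coll
    by_cases hR : PySem.Str.startswith l "reasoning:" = true
    · simp only [pvLoopB, pvLoopA, hR, if_pos]
      rw [ih v [] true, pvD3_insR]
      simp
    · by_cases hV : PySem.Str.startswith l "verdict:" = true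
      · simp only [pvLoopB, pvLoopA, pvCollectA, hR, hV, if_pos, if_neg, Bool.false_eq_true,
          not_false_iff]
        rw [pvD3_insV, ih (pvVerdictOf l) acc false, pvD3_insV]
        cases coll <;> simp
      · by_cases hS : PySem.Str.strip l = ""
        · simp only [pvLoopB, pvLoopA, pvCollectA, hR, hV, hS, if_neg, Bool.false_eq_true,
            not_false_iff, ne_eq, not_true_eq_false, decide_false, Bool.and_false]
          rw [ih v acc coll]
        · cases coll with
          | true =>
            simp only [pvLoopB, pvLoopA, pvCollectA, hR, hV, hS, if_neg, Bool.false_eq_true,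
              not_false_iff, ne_eq, decide_true, Bool.true_and, if_pos]
            rw [ih v (acc ++ [PySem.Str.strip l]) true]
            simp
          | false =>
            simp only [pvLoopB, pvLoopA, hR, hV, if_neg, Bool.false_eq_true, not_false_iff,
              Bool.false_and]
            rw [ih v acc false]
            simp

-- ===== VERDICT (by name: the statement is the Claim_ definition above) =====
theorem process_model_output_errors_spec : Claim_equal_process_model_output_errors := by
  intro output _
  unfold Spec_process_model_output_errors
  cases output with
  | none => rfl
  | some out =>
    have hd : (PySem.Dict.ofList
        [("verdict", "Unknown"), ("reasoning", ""), ("explanation", out)] : PySem.Dict String String)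
        = pvD3 "Unknown" "" out := by
      simp [pvD3, PySem.Dict.ofList, PySem.Dict.empty, PySem.Dict.update, PySem.Dict.insert,
        PySem.Dict.contains, PySem.Dict.get?]
    have h := pvLoop_eq (pvLines out) "" out "Unknown" [] false
    have hj : PySem.Str.join " " ([] : List String) = "" := rfl
    simp only [Bool.false_eq_true, if_false, List.append_nil, hj] at h
    simp only [process_model_output_errors, process_model_output_errors_alt, hd]
    rw [← h]
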